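-- pv_equiv track=rewrite | github.com/RoyKlaasseBos/royklaassebos.github.io | Data_Science_Email_Course/Solutions_Self_Assessment_Python.py | matching_pairs
-- ===== SOURCE A (Python) =====
-- def matching_pairs(data_list):
--     pairs = []
--     for index1, pair1 in enumerate(data_list):
--         for index2, pair2 in enumerate(data_list):
--
--             if (((pair1[1] + pair2[1]) % 3 == 0) and # the sum of the number is a multiple of 3
--                 index1 != index2 and # it must be different pairs (so not two times the same item)
--                 ((pair1[0] in 'aeiou' and pair2[0] in 'aeiou') or # only vowel-vowel combination
--                 (pair1[0] not in 'aeiou' and pair2[0] not in 'aeiou')) and # only consonant-consonant combination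
--                 (index2, index1) not in pairs): # because (A,B) is the same as (B,A)
--                     pairs.append((index1, index2))
--
--     return pairs
-- ===== SOURCE B (Python) =====
-- def matching_pairs(data_list):
--     result = []
--     for i, (s1, v1) in enumerate(data_list):
--         c1 = s1 in 'aeiou'
--         for j, (s2, v2) in enumerate(data_list[i + 1:], i + 1):
--             if (v1 + v2) % 3 == 0 and c1 == (s2 in 'aeiou'):
--                 result.append((i, j))
--     return result
-- ===== Notes on version B (the rewrite author's own statement) =====
-- stated objective: faster
-- what changed: B iterates only over index pairs with index2 > index1 (the match condition is symmetric), so the linear membership scan of the growing result list that A performs on every inner iteration disappears entirely.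
import Mathlib
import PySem

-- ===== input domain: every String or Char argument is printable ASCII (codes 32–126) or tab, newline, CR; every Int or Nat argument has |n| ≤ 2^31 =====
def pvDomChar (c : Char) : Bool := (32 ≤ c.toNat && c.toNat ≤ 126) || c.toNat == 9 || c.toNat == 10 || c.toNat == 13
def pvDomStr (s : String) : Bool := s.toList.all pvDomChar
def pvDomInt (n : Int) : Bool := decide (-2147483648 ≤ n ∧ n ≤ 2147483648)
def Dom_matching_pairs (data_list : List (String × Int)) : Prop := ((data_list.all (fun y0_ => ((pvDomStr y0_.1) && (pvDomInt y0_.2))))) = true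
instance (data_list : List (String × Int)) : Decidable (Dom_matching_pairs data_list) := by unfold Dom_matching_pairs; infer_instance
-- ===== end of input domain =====

-- B scans only the pairs with index2 > index1 (the match condition is symmetric), removing A's
-- inner membership scan of the growing result list; same return value, faster by construction.

-- ===== PORT A =====
def matching_pairs (data_list : List (String × Int)) : List (Int × Int) :=
  (PySem.List.enumerate data_list).foldl (fun pairs ip1 =>
    (PySem.List.enumerate data_list).foldl (fun pairs ip2 =>
      if (PySem.Int.mod (ip1.2.2 + ip2.2.2) 3 == 0)
          && (ip1.1 != ip2.1)
          && ((PySem.Str.isIn ip1.2.1 "aeiou" && PySem.Str.isIn ip2.2.1 "aeiou")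
              || (!PySem.Str.isIn ip1.2.1 "aeiou" && !PySem.Str.isIn ip2.2.1 "aeiou"))
          && !(pairs.contains (ip2.1, ip1.1))
      then pairs ++ [(ip1.1, ip2.1)] else pairs) pairs) []

-- ===== PORT B =====
def matching_pairs_alt (data_list : List (String × Int)) : List (Int × Int) :=
  (PySem.List.enumerate data_list).foldl (fun result ip =>
    let c1 := PySem.Str.isIn ip.2.1 "aeiou"
    (PySem.List.enumerate (PySem.List.slice data_list (some (ip.1 + 1)) none) (ip.1 + 1)).foldl
      (fun result jq =>
        if (PySem.Int.mod (ip.2.2 + jq.2.2) 3 == 0) && (c1 == PySem.Str.isIn jq.2.1 "aeiou")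
        then result ++ [(ip.1, jq.1)] else result) result) []

-- ===== PRECONDITION & SPEC =====
def Spec_matching_pairs (data_list : List (String × Int)) (out : List (Int × Int)) : Prop := out = matching_pairs_alt data_list
instance (data_list : List (String × Int)) (out : List (Int × Int)) : Decidable (Spec_matching_pairs data_list out) := by unfold Spec_matching_pairs; infer_instance

-- ===== CLAIM (what is proved, stated in full; the proofs are below) =====
def Claim_equal_matching_pairs : Prop := ∀ (data_list : List (String × Int)), Dom_matching_pairs data_list → Spec_matching_pairs data_list (matching_pairs data_list)

-- ===== LEMMAS AND PROOFS =====

-- the k-th pair of the list (in-range everywhere it is used)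
def pvP (dl : List (String × Int)) (k : Nat) : String × Int := dl.getD k ("", 0)

-- the symmetric match condition shared by both programs
def pvCond (p q : String × Int) : Bool :=
  (PySem.Int.mod (p.2 + q.2) 3 == 0) && (PySem.Str.isIn p.1 "aeiou" == PySem.Str.isIn q.1 "aeiou")

-- pairs (i, j) produced for a fixed first index i, j ranging over 0..m-1
def pvRowPart (dl : List (String × Int)) (i m : Nat) : List (Int × Int) :=
  ((List.range m).filter (fun j => decide (i < j) && pvCond (pvP dl i) (pvP dl j))).map
    (fun j : Nat => ((i : Int), (j : Int)))

-- all pairs produced by the first k outer indices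
def pvCanon (dl : List (String × Int)) (k : Nat) : List (Int × Int) :=
  (List.range k).flatMap (fun i => pvRowPart dl i dl.length)

theorem pvCond_symm (p q : String × Int) : pvCond p q = pvCond q p := by
  unfold pvCond
  rw [Int.add_comm]
  cases PySem.Str.isIn p.1 "aeiou" <;> cases PySem.Str.isIn q.1 "aeiou" <;> simp

theorem pvOr_eq_beq (v w : Bool) : ((v && w) || (!v && !w)) = (v == w) := by
  cases v <;> cases w <;> rfl

theorem pvEnum_drop (dl : List (String × Int)) (m : Nat) (hm : m ≤ dl.length) :
    PySem.List.enumerate (dl.drop m) (m : Int)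
      = (List.range' m (dl.length - m)).map (fun j : Nat => ((j : Int), pvP dl j)) := by
  apply List.ext_getElem
  · simp [PySem.List.length_enumerate]
  · intro k h1 h2
    have hk : k < dl.length - m := by simpa [PySem.List.length_enumerate] using h1
    rw [PySem.List.getElem_enumerate]
    simp only [List.getElem_map, List.getElem_range']
    refine Prod.ext ?_ ?_
    · push_cast; ring
    · simp only [List.getElem_drop]
      unfold pvP
      rw [List.getD_eq_getElem dl _ (by omega)]
      norm_num

theorem pvEnum_zero (dl : List (String × Int)) :
    PySem.List.enumerate dl 0 = (List.range dl.length).map (fun j : Nat => ((j : Int), pvP dl j)) := by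
  have := pvEnum_drop dl 0 (Nat.zero_le _)
  simpa [List.range'_eq_map_range, List.foldl_map, Function.comp] using this

theorem pvRowPart_succ (dl : List (String × Int)) (i m : Nat) :
    pvRowPart dl i (m + 1)
      = pvRowPart dl i m
        ++ (if decide (i < m) && pvCond (pvP dl i) (pvP dl m) then [((i : Int), (m : Int))] else []) := by
  unfold pvRowPart
  rw [List.range_succ, List.filter_append, List.map_append]
  congr 1
  by_cases h : (decide (i < m) && pvCond (pvP dl i) (pvP dl m)) = true <;> simp [h]

theorem pvCanon_succ (dl : List (String × Int)) (k : Nat) :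
    pvCanon dl (k + 1) = pvCanon dl k ++ pvRowPart dl k dl.length := by
  unfold pvCanon
  rw [List.range_succ, List.flatMap_append]
  simp

theorem mem_pvRowPart (dl : List (String × Int)) (i m : Nat) (x : Int × Int) :
    x ∈ pvRowPart dl i m
      ↔ ∃ j : Nat, j < m ∧ i < j ∧ pvCond (pvP dl i) (pvP dl j) = true ∧ x = ((i : Int), (j : Int)) := by
  unfold pvRowPart
  simp only [List.mem_map, List.mem_filter, List.mem_range, Bool.and_eq_true, decide_eq_true_eq]
  constructor
  · rintro ⟨j, ⟨hj, hij, hc⟩, rfl⟩; exact ⟨j, hj, hij, hc, rfl⟩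
  · rintro ⟨j, hj, hij, hc, rfl⟩; exact ⟨j, ⟨hj, hij, hc⟩, rfl⟩

theorem mem_pvCanon (dl : List (String × Int)) (k : Nat) (x : Int × Int) :
    x ∈ pvCanon dl k
      ↔ ∃ i j : Nat, i < k ∧ i < j ∧ j < dl.length ∧ pvCond (pvP dl i) (pvP dl j) = true
          ∧ x = ((i : Int), (j : Int)) := by
  unfold pvCanon
  simp only [List.mem_flatMap, List.mem_range]
  constructor
  · rintro ⟨i, hi, hx⟩
    obtain ⟨j, hj, hij, hc, rfl⟩ := (mem_pvRowPart dl i _ x).mp hx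
    exact ⟨i, j, hi, hij, hj, hc, rfl⟩
  · rintro ⟨i, j, hi, hij, hj, hc, rfl⟩
    exact ⟨i, hi, (mem_pvRowPart dl i _ _).mpr ⟨j, hj, hij, hc, rfl⟩⟩

-- membership test A performs, evaluated on the invariant state
theorem pvContains_state (dl : List (String × Int)) (i m : Nat) (hi : i < dl.length) :
    ((pvCanon dl i ++ pvRowPart dl i m).contains ((m : Int), (i : Int)))
      = (decide (m < i) && pvCond (pvP dl m) (pvP dl i)) := by
  rw [List.contains_eq_mem]
  by_cases h : ((m : Int), (i : Int)) ∈ pvCanon dl i ++ pvRowPart dl i m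
  · rw [decide_eq_true h]
    rcases List.mem_append.mp h with h' | h'
    · obtain ⟨a, b, ha, hab, hb, hc, he⟩ := (mem_pvCanon dl i _).mp h'
      obtain ⟨h1, h2⟩ := Prod.mk.injEq .. ▸ he
      have : m = a := by exact_mod_cast h1
      have : i = b := by exact_mod_cast h2
      subst_vars
      simp [ha, hc]
    · obtain ⟨j, hj, hij, hc, he⟩ := (mem_pvRowPart dl i m _).mp h'
      obtain ⟨h1, h2⟩ := Prod.mk.injEq .. ▸ he
      have hmi : m = i := by exact_mod_cast h1
      have hib : i = j := by exact_mod_cast h2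
      omega
  · rw [decide_eq_false h]
    by_cases hmlt : m < i
    · by_cases hc : pvCond (pvP dl m) (pvP dl i) = true
      · exfalso
        exact h (List.mem_append.mpr (Or.inl ((mem_pvCanon dl i _).mpr
          ⟨m, i, hmlt, hmlt, hi, hc, rfl⟩)))
      · simp [Bool.eq_false_iff.mpr hc]
    · simp [hmlt]

theorem pvBoolStep (c1 cvw : Bool) (i m : Nat) :
    ((((c1 && (((i : Nat) : Int) != ((m : Nat) : Int))) && cvw) && !(decide (m < i) && (c1 && cvw)))
     = (decide (i < m) && (c1 && cvw))) := by
  cases c1 <;> cases cvw <;> simp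
  rw [Bool.eq_iff_iff]
  simp [bne_iff_ne]
  omega

-- one inner step of A, from the invariant state
theorem pvA_inner_step (dl : List (String × Int)) (i m : Nat) (hi : i < dl.length) :
    (if (PySem.Int.mod ((pvP dl i).2 + (pvP dl m).2) 3 == 0)
          && (((i : Nat) : Int) != ((m : Nat) : Int))
          && ((PySem.Str.isIn (pvP dl i).1 "aeiou" && PySem.Str.isIn (pvP dl m).1 "aeiou")
              || (!PySem.Str.isIn (pvP dl i).1 "aeiou" && !PySem.Str.isIn (pvP dl m).1 "aeiou"))
          && !((pvCanon dl i ++ pvRowPart dl i m).contains ((m : Int), (i : Int)))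
      then (pvCanon dl i ++ pvRowPart dl i m) ++ [((i : Int), (m : Int))]
      else pvCanon dl i ++ pvRowPart dl i m)
      = pvCanon dl i ++ pvRowPart dl i (m + 1) := by
  rw [pvContains_state dl i m hi, pvOr_eq_beq, pvRowPart_succ,
    pvCond_symm (pvP dl m) (pvP dl i),
    show pvCond (pvP dl i) (pvP dl m)
        = ((PySem.Int.mod ((pvP dl i).2 + (pvP dl m).2) 3 == 0)
            && (PySem.Str.isIn (pvP dl i).1 "aeiou" == PySem.Str.isIn (pvP dl m).1 "aeiou")) from rfl,
    pvBoolStep]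
  split_ifs with hif
  · rw [List.append_assoc]
  · simp

-- A's inner loop over the tail range' m (n-m), from the invariant state
theorem pvA_inner (dl : List (String × Int)) (i : Nat) (hi : i < dl.length) :
    ∀ c m : Nat, m + c = dl.length →
      (List.range' m c).foldl
        (fun pairs j =>
          if (PySem.Int.mod ((pvP dl i).2 + (pvP dl j).2) 3 == 0)
              && (((i : Nat) : Int) != ((j : Nat) : Int))
              && ((PySem.Str.isIn (pvP dl i).1 "aeiou" && PySem.Str.isIn (pvP dl j).1 "aeiou")
                  || (!PySem.Str.isIn (pvP dl i).1 "aeiou" && !PySem.Str.isIn (pvP dl j).1 "aeiou"))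
              && !(pairs.contains ((j : Int), (i : Int)))
          then pairs ++ [((i : Int), (j : Int))] else pairs)
        (pvCanon dl i ++ pvRowPart dl i m)
      = pvCanon dl i ++ pvRowPart dl i dl.length := by
  intro c
  induction c with
  | zero => intro m hm; simp at hm; rw [hm]; simp
  | succ c ih =>
    intro m hm
    rw [List.range'_succ, List.foldl_cons, pvA_inner_step dl i m hi]
    exact ih (m + 1) (by omega)

-- A's outer loop
theorem pvA_outer (dl : List (String × Int)) :
    ∀ c k : Nat, k + c = dl.length →
      (List.range' k c).foldl
        (fun pairs i =>
          (List.range dl.length).foldl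
            (fun pairs j =>
              if (PySem.Int.mod ((pvP dl i).2 + (pvP dl j).2) 3 == 0)
                  && (((i : Nat) : Int) != ((j : Nat) : Int))
                  && ((PySem.Str.isIn (pvP dl i).1 "aeiou" && PySem.Str.isIn (pvP dl j).1 "aeiou")
                      || (!PySem.Str.isIn (pvP dl i).1 "aeiou" && !PySem.Str.isIn (pvP dl j).1 "aeiou"))
                  && !(pairs.contains ((j : Int), (i : Int)))
              then pairs ++ [((i : Int), (j : Int))] else pairs)
            pairs)
        (pvCanon dl k)
      = pvCanon dl dl.length := by
  intro c
  induction c with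
  | zero => intro k hk; simp at hk; rw [hk]; rfl
  | succ c ih =>
    intro k hk
    rw [List.range'_succ, List.foldl_cons]
    have hk' : k < dl.length := by omega
    have hstart : pvCanon dl k = pvCanon dl k ++ pvRowPart dl k 0 := by
      unfold pvRowPart; simp
    have hinner := pvA_inner dl k hk' dl.length 0 (by omega)
    rw [← List.range_eq_range'] at hinner
    rw [hstart, hinner, ← pvCanon_succ]
    exact ih (k + 1) (by omega)

theorem pvA_eq_canon (dl : List (String × Int)) : matching_pairs dl = pvCanon dl dl.length := by
  unfold matching_pairs
  rw [pvEnum_zero]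
  simp only [List.foldl_map]
  have h := pvA_outer dl dl.length 0 (by omega)
  rw [← List.range_eq_range'] at h
  have h0 : pvCanon dl 0 = ([] : List (Int × Int)) := by unfold pvCanon; simp
  rw [h0] at h
  exact h

-- B-side: the filtered full range equals the filtered tail range
theorem pvFilter_range_gt (n i : Nat) (hi : i < n) (q : Nat → Bool) :
    (List.range n).filter (fun j => decide (i < j) && q j)
      = (List.range' (i + 1) (n - (i + 1))).filter q := by
  have hsplit : List.range n = List.range (i + 1) ++ (List.range (n - (i + 1))).map ((i + 1) + ·) := by
    rw [← List.range_add]; congr 1; omega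
  rw [hsplit, List.filter_append]
  have h1 : (List.range (i + 1)).filter (fun j => decide (i < j) && q j) = [] := by
    apply List.filter_eq_nil_iff.mpr
    intro j hj
    simp only [List.mem_range] at hj
    simp [Nat.not_lt.mpr (Nat.lt_succ_iff.mp hj)]
  have h2 : ((List.range (n - (i + 1))).map ((i + 1) + ·)).filter (fun j => decide (i < j) && q j)
      = ((List.range (n - (i + 1))).map ((i + 1) + ·)).filter q := by
    apply List.filter_congr
    intro j hj
    simp only [List.mem_map, List.mem_range] at hj
    obtain ⟨a, _, rfl⟩ := hj
    have : i < i + 1 + a := by omega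
    simp [this]
  rw [h1, h2, List.range'_eq_map_range]
  simp

theorem pvB_eq_canon (dl : List (String × Int)) : matching_pairs_alt dl = pvCanon dl dl.length := by
  unfold matching_pairs_alt
  rw [pvEnum_zero, List.foldl_map]
  unfold pvCanon
  rw [← List.nil_append (List.flatMap (fun i => pvRowPart dl i dl.length) (List.range dl.length)),
    ← PySem.List.foldl_append_eq_flatMap]
  apply PySem.List.foldl_congr_mem
  intro res i hi
  simp only [List.mem_range] at hi
  show (PySem.List.enumerate
      (PySem.List.slice dl (some (((i : Nat) : Int) + 1)) none) (((i : Nat) : Int) + 1)).foldl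
      (fun result jq =>
        if (PySem.Int.mod ((pvP dl i).2 + jq.2.2) 3 == 0)
            && (PySem.Str.isIn (pvP dl i).1 "aeiou" == PySem.Str.isIn jq.2.1 "aeiou")
        then result ++ [(((i : Nat) : Int), jq.1)] else result) res
    = res ++ pvRowPart dl i dl.length
  have hslice : PySem.List.slice dl (some (((i : Nat) : Int) + 1)) none = dl.drop (i + 1) := by
    rw [PySem.List.slice_from]
    congr 1
    omega
  rw [hslice]
  have hdrop : PySem.List.enumerate (dl.drop (i + 1)) (((i : Nat) : Int) + 1)
      = (List.range' (i + 1) (dl.length - (i + 1))).map (fun j : Nat => ((j : Int), pvP dl j)) := by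
    have := pvEnum_drop dl (i + 1) (by omega)
    rw [show (((i : Nat) : Int) + 1) = (((i + 1 : Nat) : Nat) : Int) by push_cast; ring]
    exact this
  rw [hdrop, List.foldl_map, PySem.List.foldl_append_if]
  congr 1
  unfold pvRowPart
  rw [pvFilter_range_gt dl.length i hi (fun j => pvCond (pvP dl i) (pvP dl j))]
  rfl

-- ===== VERDICT (by name: the statement is the Claim_ definition above) =====
theorem matching_pairs_spec : Claim_equal_matching_pairs := by
  intro dl _
  unfold Spec_matching_pairs
  rw [pvA_eq_canon, pvB_eq_canon]
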